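-- pv_equiv track=rewrite | github.com/qianzii2/Z1DB | storage/compression/delta.py | delta_of_delta_encode
-- ===== SOURCE A (Python) =====
-- from typing import List, Tuple
--
-- def delta_of_delta_encode(values: list) -> Tuple[int, int, list]:
--     """Delta-of-delta: best for near-constant-step sequences.
--     Example: timestamps with fixed interval → dod ≈ 0."""
--     if len(values) < 2:
--         return values[0] if values else 0, 0, []
--     base = values[0]
--     first_delta = values[1] - values[0]
--     dod = [0] * len(values)
--     prev_delta = first_delta
--     for i in range(2, len(values)):
--         curr_delta = values[i] - values[i - 1]
--         dod[i] = curr_delta - prev_delta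
--         prev_delta = curr_delta
--     return base, first_delta, dod
-- ===== SOURCE B (Python) =====
-- def delta_of_delta_encode(values: list):
--     """Delta-of-delta via an explicit deltas table and a second differencing pass."""
--     if len(values) < 2:
--         return values[0] if values else 0, 0, []
--     deltas = [b - a for a, b in zip(values, values[1:])]
--     dod = [0, 0] + [b - a for a, b in zip(deltas, deltas[1:])]
--     return values[0], deltas[0], dod
-- ===== Notes on version B (the rewrite author's own statement) =====
-- stated objective: alternative
-- what changed: Replaces the single running-accumulator loop that writes into a preallocated zero array with a two-stage pipeline: build the full first-differences table with zip, then difference it once more with a second zip and prepend the two leading zeros.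
import Mathlib
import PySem

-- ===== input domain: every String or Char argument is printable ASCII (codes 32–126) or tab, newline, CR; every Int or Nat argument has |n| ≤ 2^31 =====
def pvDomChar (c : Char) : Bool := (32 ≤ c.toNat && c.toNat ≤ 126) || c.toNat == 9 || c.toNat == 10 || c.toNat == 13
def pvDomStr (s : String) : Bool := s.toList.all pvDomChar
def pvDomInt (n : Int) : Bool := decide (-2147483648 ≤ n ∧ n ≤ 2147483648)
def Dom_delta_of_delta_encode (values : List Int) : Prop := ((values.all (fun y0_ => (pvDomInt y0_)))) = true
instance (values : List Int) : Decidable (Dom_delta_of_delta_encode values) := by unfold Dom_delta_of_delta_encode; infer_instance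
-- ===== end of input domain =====

-- B builds an explicit deltas table with zip and differences it again, instead of A's
-- running-accumulator loop writing into a preallocated zero array (objective: alternative).

-- ===== PORT A =====
-- literal transliteration of A: guard, preallocated [0]*n list, index loop with prev_delta accumulator
def delta_of_delta_encode (values : List Int) : Int × Int × List Int :=
  if values.length < 2 then
    ((if values.isEmpty then 0 else PySem.List.pyGetD values 0 0), 0, [])
  else
    let base := PySem.List.pyGetD values 0 0
    let first_delta := PySem.List.pyGetD values 1 0 - PySem.List.pyGetD values 0 0
    let st := (PySem.List.pyRange 2 (values.length : Int) 1).foldl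
      (fun (st : List Int × Int) i =>
        let curr := PySem.List.pyGetD values i 0 - PySem.List.pyGetD values (i - 1) 0
        (PySem.List.pySetD st.1 i (curr - st.2), curr))
      (List.replicate values.length 0, first_delta)
    (base, first_delta, st.1)

-- ===== PORT B =====
-- literal transliteration of B: deltas = [b-a for a,b in zip(values, values[1:])], dod = [0,0] + second differences
def delta_of_delta_encode_alt (values : List Int) : Int × Int × List Int :=
  if values.length < 2 then
    ((if values.isEmpty then 0 else PySem.List.pyGetD values 0 0), 0, [])
  else
    let deltas := (values.zip (PySem.List.slice values (some 1) none)).map (fun p => p.2 - p.1)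
    let dod := [0, 0] ++ (deltas.zip (PySem.List.slice deltas (some 1) none)).map (fun p => p.2 - p.1)
    (PySem.List.pyGetD values 0 0, PySem.List.pyGetD deltas 0 0, dod)

-- ===== PRECONDITION & SPEC =====
def Spec_delta_of_delta_encode (values : List Int) (out : Int × Int × List Int) : Prop := out = delta_of_delta_encode_alt values
instance (values : List Int) (out : Int × Int × List Int) : Decidable (Spec_delta_of_delta_encode values out) := by unfold Spec_delta_of_delta_encode; infer_instance

-- ===== CLAIM (what is proved, stated in full; the proofs are below) =====
def Claim_equal_delta_of_delta_encode : Prop := ∀ (values : List Int), Dom_delta_of_delta_encode values → Spec_delta_of_delta_encode values (delta_of_delta_encode values)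

-- ===== LEMMAS AND PROOFS =====

/-- the delta at Nat position k (k ≥ 1): values[k] - values[k-1] -/
def pvDelta (v : List Int) (k : Nat) : Int := v.getD k 0 - v.getD (k - 1) 0

/-- take through set at the last kept position -/
theorem pv_take_set_succ {α : Type} (L : List α) (k : Nat) (x : α) (h : k < L.length) :
    (L.set k x).take (k + 1) = L.take k ++ [x] := by
  induction L generalizing k with
  | nil => simp at h
  | cons a L ih =>
    cases k with
    | zero => rfl
    | succ k =>
      simp only [List.set_cons_succ, List.take_succ_cons, ih k (by simpa using h)]
      rfl

/-- prepend the first value of a range map -/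
theorem pv_cons_map_range (f : Nat → Int) (m : Nat) :
    f 0 :: (List.range m).map (fun t => f (t + 1)) = (List.range (m + 1)).map f := by
  rw [List.range_succ_eq_map]
  simp [List.map_map, Function.comp]

/-- Invariant of A's loop: starting at index k with accumulator pd, the final dod list keeps
the first k entries of L and fills the rest with delta-of-deltas (the first one against pd). -/
theorem loopA_eq (v : List Int) : ∀ (k : Nat) (L : List Int) (pd : Int),
    1 ≤ k → k ≤ v.length → L.length = v.length →
    ((PySem.List.pyRange (k : Int) (v.length : Int) 1).foldl
      (fun (st : List Int × Int) i =>
        let curr := PySem.List.pyGetD v i 0 - PySem.List.pyGetD v (i - 1) 0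
        (PySem.List.pySetD st.1 i (curr - st.2), curr))
      (L, pd)).1
    = L.take k ++ (if k < v.length then
        (pvDelta v k - pd) :: (List.range (v.length - k - 1)).map (fun t => pvDelta v (k + 1 + t) - pvDelta v (k + t))
      else []) := by
  intro k
  induction hfuel : v.length - k generalizing k with
  | zero =>
    intro L pd h1 hk hL
    have hkn : k = v.length := by omega
    rw [PySem.List.pyRange_one_eq_nil (by omega)]
    simp [hkn, ← hL, List.take_length, List.foldl_nil]
  | succ m ih =>
    intro L pd h1 hk hL
    have hlt : k < v.length := by omega
    rw [PySem.List.pyRange_one_cons (by exact_mod_cast hlt)]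
    simp only [List.foldl_cons]
    have hcast : ((k : Int) + 1) = ((k + 1 : Nat) : Int) := by push_cast; ring
    have hsub : ((k : Int) - 1) = ((k - 1 : Nat) : Int) := by omega
    rw [hcast]
    have hL' : (PySem.List.pySetD L (k : Int) (pvDelta v k - pd)).length = v.length := by
      rw [PySem.List.pySetD_natCast]; simpa using hL
    have step :
        (PySem.List.pyGetD v (k : Int) 0 - PySem.List.pyGetD v ((k : Int) - 1) 0) = pvDelta v k := by
      rw [hsub]; simp [pvDelta, PySem.List.pyGetD_natCast]
    rw [step]
    rw [ih (k + 1) (by omega) (PySem.List.pySetD L (k : Int) (pvDelta v k - pd)) (pvDelta v k)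
        (by omega) (by omega) hL']
    rw [PySem.List.pySetD_natCast]
    rw [pv_take_set_succ _ _ _ (by omega), if_pos hlt]
    simp only [Nat.add_sub_cancel]
    by_cases hk1 : k + 1 < v.length
    · rw [if_pos hk1, List.append_assoc, List.singleton_append]
      congr 1
      rw [show m = (m - 1) + 1 from by omega,
          ← pv_cons_map_range (fun t => pvDelta v (k + 1 + t) - pvDelta v (k + t)) (m - 1)]
      simp only [Nat.add_sub_cancel, Nat.add_zero]
      congr 1
      congr 1
      apply List.map_congr_left
      intro t _
      have e1 : k + 1 + 1 + t = k + 1 + (t + 1) := by omega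
      have e2 : k + 1 + t = k + (t + 1) := by omega
      rw [e1, e2]
    · rw [if_neg hk1]
      have hm0 : m = 0 := by omega
      simp [hm0]

/-- B's second-difference comprehension in closed range-map form -/
theorem b_dod_eq (v : List Int) (h2 : 2 ≤ v.length) :
    (((v.zip (PySem.List.slice v (some 1) none)).map (fun p => p.2 - p.1)).zip
      (PySem.List.slice ((v.zip (PySem.List.slice v (some 1) none)).map (fun p => p.2 - p.1)) (some 1) none)).map
      (fun p => p.2 - p.1)
    = (List.range (v.length - 2)).map (fun t => pvDelta v (t + 2) - pvDelta v (t + 1)) := by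
  rw [PySem.List.slice_from_one, PySem.List.slice_from_one]
  apply List.ext_getElem
  · simp; omega
  · intro i h1 h2'
    simp only [List.getElem_map, List.getElem_zip, List.getElem_tail, List.getElem_range]
    simp only [List.length_map, List.length_zip, List.length_tail] at h1
    have hlen : i + 2 < v.length := by simp at h1; omega
    simp only [pvDelta]
    rw [List.getD_eq_getElem _ _ (by omega), List.getD_eq_getElem _ _ (by omega),
        List.getD_eq_getElem _ _ (by omega), List.getD_eq_getElem _ _ (by omega)]
    simp only [Nat.add_sub_cancel, show i + 2 - 1 = i + 1 from by omega]

-- ===== VERDICT (by name: the statement is the Claim_ definition above) =====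
theorem delta_of_delta_encode_spec : Claim_equal_delta_of_delta_encode := by
  intro values _
  unfold Spec_delta_of_delta_encode delta_of_delta_encode delta_of_delta_encode_alt
  by_cases hshort : values.length < 2
  · simp [hshort]
  · simp only [if_neg hshort]
    have h2 : 2 ≤ values.length := by omega
    have hfd : PySem.List.pyGetD values 1 0 - PySem.List.pyGetD values 0 0 = pvDelta values 1 := by
      simp [pysem, pvDelta, List.getD]
    refine Prod.ext rfl (Prod.ext ?_ ?_)
    · -- first_delta = deltas[0]
      rw [PySem.List.slice_from_one]
      rcases values with _ | ⟨a, _ | ⟨b, rest⟩⟩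
      · simp at h2
      · simp at h2
      · simp [pysem]
    · -- the dod lists agree
      have hloop := loopA_eq values 2 (List.replicate values.length 0)
        (PySem.List.pyGetD values 1 0 - PySem.List.pyGetD values 0 0) (by omega) h2 (by simp)
      simp only [Nat.cast_ofNat] at hloop
      simp only
      rw [hloop, b_dod_eq values h2, hfd]
      have htake2 : (List.replicate values.length (0 : Int)).take 2 = [0, 0] := by
        rw [List.take_replicate]
        have : min 2 values.length = 2 := by omega
        rw [this]; rfl
      rw [htake2]
      by_cases h3 : 2 < values.length
      · rw [if_pos h3]
        congr 1
        rw [show values.length - 2 = (values.length - 2 - 1) + 1 from by omega,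
            ← pv_cons_map_range (fun t => pvDelta values (t + 2) - pvDelta values (t + 1)) _]
        simp only [Nat.add_sub_cancel, Nat.zero_add]
        congr 1
        apply List.map_congr_left
        intro t _
        have e1 : 2 + 1 + t = t + 1 + 2 := by omega
        have e2 : 2 + t = t + 1 + 1 := by omega
        rw [e1, e2]
      · rw [if_neg h3]
        have : values.length - 2 = 0 := by omega
        rw [this]
        simp
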